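-- pv_equiv track=rewrite | github.com/pypi-data/pypi-mirror-182 | packages/extracto/extracto-0.12.tar.gz/extracto-0.12/extracto/bannable_product.py | _bannable_product_3
-- ===== SOURCE A (Python) =====
-- def _bannable_product_3(bans, _0s, _1s, _2s):
--     ban_0 = bans[0]
--     ban_1 = bans[1]
--     ban_2 = bans[2]
--
--     for _0 in _0s:
--         if _0 in ban_0:
--             continue
--         for _1 in _1s:
--             if _1 in ban_1:
--                 _1s = [x for x in _1s if not x in ban_1]
--                 continue
--             if _0 in ban_0:
--                 break
--             for _2 in _2s:
--                 if _2 in ban_2: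
--                     _2s = [x for x in _2s if not x in ban_2]
--                     continue
--                 if _0 in ban_0 or _1 in ban_1:
--                     break
--
--                 yield (_0, _1, _2,)
-- ===== SOURCE B (Python) =====
-- def _bannable_product_3(bans, _0s, _1s, _2s):
--     f0 = [x for x in _0s if x not in bans[0]]
--     f1 = [x for x in _1s if x not in bans[1]]
--     f2 = [x for x in _2s if x not in bans[2]]
--     for a in f0:
--         for b in f1:
--             for c in f2:
--                 yield (a, b, c)
-- ===== Notes on version B (the rewrite author's own statement) =====
-- stated objective: simpler
-- what changed: B filters the three lists once up front and emits a plain Cartesian product of the filtered lists, replacing A's interleaved membership tests and self-rebuilding of _1s/_2s inside the nested loops.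
import Mathlib
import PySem

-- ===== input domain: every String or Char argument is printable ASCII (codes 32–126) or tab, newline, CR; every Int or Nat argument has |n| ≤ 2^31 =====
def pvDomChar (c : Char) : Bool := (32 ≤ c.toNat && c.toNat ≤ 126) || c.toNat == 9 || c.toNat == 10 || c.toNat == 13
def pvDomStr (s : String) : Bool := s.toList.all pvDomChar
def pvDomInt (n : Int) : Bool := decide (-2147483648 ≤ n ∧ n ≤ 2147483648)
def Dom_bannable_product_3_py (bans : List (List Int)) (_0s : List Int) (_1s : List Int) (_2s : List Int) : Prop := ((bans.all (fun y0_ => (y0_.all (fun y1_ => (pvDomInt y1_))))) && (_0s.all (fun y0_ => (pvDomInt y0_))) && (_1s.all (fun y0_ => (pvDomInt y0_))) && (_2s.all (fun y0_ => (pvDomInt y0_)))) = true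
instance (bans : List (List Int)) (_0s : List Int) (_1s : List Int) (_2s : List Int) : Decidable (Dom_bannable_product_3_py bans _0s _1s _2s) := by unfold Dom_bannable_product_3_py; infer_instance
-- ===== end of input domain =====

-- B filters the three input lists once up front and emits a plain Cartesian product of the
-- filtered lists, instead of A's interleaved membership tests with self-rebuilding lists
-- inside the nested loops (objective: simpler).

-- ===== PORT A =====
-- innermost `for _2 in _2s: …` loop of A: iterates over the list bound at loop entry,
-- while carrying the current value of the variable `_2s` (reassigned when a banned
-- element is seen); returns (final `_2s` value, yielded triples)
def pvALoop2 (ban0 ban1 ban2 : List Int) (v0 v1 : Int) :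
    List Int → List Int → List Int × List (Int × Int × Int)
  | [], cur => (cur, [])
  | v :: rest, cur =>
    if v ∈ ban2 then
      pvALoop2 ban0 ban1 ban2 v0 v1 rest (cur.filter (fun x => !decide (x ∈ ban2)))
    else if v0 ∈ ban0 ∨ v1 ∈ ban1 then (cur, [])
    else
      let r := pvALoop2 ban0 ban1 ban2 v0 v1 rest cur
      (r.1, (v0, v1, v) :: r.2)

-- middle `for _1 in _1s: …` loop of A: returns (final `_1s`, final `_2s`, yielded triples)
def pvALoop1 (ban0 ban1 ban2 : List Int) (v0 : Int) :
    List Int → List Int → List Int → List Int × List Int × List (Int × Int × Int)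
  | [], s1, s2 => (s1, s2, [])
  | v :: rest, s1, s2 =>
    if v ∈ ban1 then
      pvALoop1 ban0 ban1 ban2 v0 rest (s1.filter (fun x => !decide (x ∈ ban1))) s2
    else if v0 ∈ ban0 then (s1, s2, [])
    else
      let r2 := pvALoop2 ban0 ban1 ban2 v0 v s2 s2
      let r1 := pvALoop1 ban0 ban1 ban2 v0 rest s1 r2.1
      (r1.1, r1.2.1, r2.2 ++ r1.2.2)

-- outer `for _0 in _0s: …` loop of A
def pvALoop0 (ban0 ban1 ban2 : List Int) :
    List Int → List Int → List Int → List (Int × Int × Int)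
  | [], _, _ => []
  | v :: rest, s1, s2 =>
    if v ∈ ban0 then pvALoop0 ban0 ban1 ban2 rest s1 s2
    else
      let r := pvALoop1 ban0 ban1 ban2 v s1 s1 s2
      r.2.2 ++ pvALoop0 ban0 ban1 ban2 rest r.1 r.2.1

def bannable_product_3_py (bans : List (List Int)) (_0s : List Int) (_1s : List Int) (_2s : List Int) : List (Int × Int × Int) :=
  -- bans[0], bans[1], bans[2]: pyGet? = none is Python's IndexError, excluded by Pre_
  match PySem.List.pyGet? bans 0, PySem.List.pyGet? bans 1, PySem.List.pyGet? bans 2 with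
  | some ban0, some ban1, some ban2 => pvALoop0 ban0 ban1 ban2 _0s _1s _2s
  | _, _, _ => []

-- ===== PORT B =====
def bannable_product_3_py_alt (bans : List (List Int)) (_0s : List Int) (_1s : List Int) (_2s : List Int) : List (Int × Int × Int) :=
  match PySem.List.pyGet? bans 0 with
  | none => []
  | some ban0 =>
  match PySem.List.pyGet? bans 1 with
  | none => []
  | some ban1 =>
  match PySem.List.pyGet? bans 2 with
  | none => []
  | some ban2 =>
    let f0 := _0s.filter (fun x => !decide (x ∈ ban0))
    let f1 := _1s.filter (fun x => !decide (x ∈ ban1))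
    let f2 := _2s.filter (fun x => !decide (x ∈ ban2))
    f0.flatMap (fun a => f1.flatMap (fun b => f2.map (fun c => (a, b, c))))

-- ===== PRECONDITION & SPEC =====
-- Pre_ excludes exactly the inputs with fewer than 3 ban lists, on which A raises IndexError
def Pre_bannable_product_3_py (bans : List (List Int)) (_0s : List Int) (_1s : List Int) (_2s : List Int) : Prop := 3 ≤ bans.length
instance (bans : List (List Int)) (_0s : List Int) (_1s : List Int) (_2s : List Int) : Decidable (Pre_bannable_product_3_py bans _0s _1s _2s) := by unfold Pre_bannable_product_3_py; infer_instance
def pvWitness_bannable_product_3_py : List (List Int) × List Int × List Int × List Int := ([[1], [], [5]], [1, 2], [3], [4, 5])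
def Spec_bannable_product_3_py (bans : List (List Int)) (_0s : List Int) (_1s : List Int) (_2s : List Int) (out : List (Int × Int × Int)) : Prop := out = bannable_product_3_py_alt bans _0s _1s _2s
instance (bans : List (List Int)) (_0s : List Int) (_1s : List Int) (_2s : List Int) (out : List (Int × Int × Int)) : Decidable (Spec_bannable_product_3_py bans _0s _1s _2s out) := by unfold Spec_bannable_product_3_py; infer_instance

-- ===== CLAIM (what is proved, stated in full; the proofs are below) =====
def Claim_equal_bannable_product_3_py : Prop := ∀ (bans : List (List Int)) (_0s : List Int) (_1s : List Int) (_2s : List Int), Dom_bannable_product_3_py bans _0s _1s _2s → Pre_bannable_product_3_py bans _0s _1s _2s → Spec_bannable_product_3_py bans _0s _1s _2s (bannable_product_3_py bans _0s _1s _2s)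

-- ===== LEMMAS AND PROOFS =====

-- inner loop: when neither v0 nor v1 is banned, the yields are the filtered iteration
-- list mapped to triples, and the final `_2s` has the same filtration as the initial one
theorem pvALoop2_spec (ban0 ban1 ban2 : List Int) (v0 v1 : Int)
    (h0 : v0 ∉ ban0) (h1 : v1 ∉ ban1) :
    ∀ (l cur : List Int),
      (pvALoop2 ban0 ban1 ban2 v0 v1 l cur).2
        = (l.filter (fun x => !decide (x ∈ ban2))).map (fun c => (v0, v1, c)) ∧
      (pvALoop2 ban0 ban1 ban2 v0 v1 l cur).1.filter (fun x => !decide (x ∈ ban2))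
        = cur.filter (fun x => !decide (x ∈ ban2)) := by
  intro l
  induction l with
  | nil => intro cur; simp [pvALoop2]
  | cons v rest ih =>
    intro cur
    by_cases hv : v ∈ ban2
    · have := ih (cur.filter (fun x => !decide (x ∈ ban2)))
      simp [pvALoop2, hv, this.1, this.2]
    · simp [pvALoop2, hv, h0, h1, (ih cur).1, (ih cur).2]

theorem pvALoop1_spec (ban0 ban1 ban2 : List Int) (v0 : Int)
    (h0 : v0 ∉ ban0) :
    ∀ (l s1 s2 : List Int),
      (pvALoop1 ban0 ban1 ban2 v0 l s1 s2).2.2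
        = (l.filter (fun x => !decide (x ∈ ban1))).flatMap
            (fun b => (s2.filter (fun x => !decide (x ∈ ban2))).map (fun c => (v0, b, c))) ∧
      (pvALoop1 ban0 ban1 ban2 v0 l s1 s2).1.filter (fun x => !decide (x ∈ ban1))
        = s1.filter (fun x => !decide (x ∈ ban1)) ∧
      (pvALoop1 ban0 ban1 ban2 v0 l s1 s2).2.1.filter (fun x => !decide (x ∈ ban2))
        = s2.filter (fun x => !decide (x ∈ ban2)) := by
  intro l
  induction l with
  | nil => intro s1 s2; simp [pvALoop1]
  | cons v rest ih =>
    intro s1 s2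
    by_cases hv : v ∈ ban1
    · have := ih (s1.filter (fun x => !decide (x ∈ ban1))) s2
      simp [pvALoop1, hv, this.1, this.2.1, this.2.2]
    · have h2 := pvALoop2_spec ban0 ban1 ban2 v0 v h0 hv s2 s2
      have hrec := ih s1 (pvALoop2 ban0 ban1 ban2 v0 v s2 s2).1
      refine ⟨?_, ?_, ?_⟩
      · simp [pvALoop1, hv, h0, h2.1, hrec.1, h2.2]
      · simp [pvALoop1, hv, h0, hrec.2.1]
      · simp [pvALoop1, hv, h0, hrec.2.2, h2.2]

theorem pvALoop0_spec (ban0 ban1 ban2 : List Int) :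
    ∀ (l s1 s2 : List Int),
      pvALoop0 ban0 ban1 ban2 l s1 s2
        = (l.filter (fun x => !decide (x ∈ ban0))).flatMap
            (fun a => (s1.filter (fun x => !decide (x ∈ ban1))).flatMap
              (fun b => (s2.filter (fun x => !decide (x ∈ ban2))).map (fun c => (a, b, c)))) := by
  intro l
  induction l with
  | nil => intro s1 s2; simp [pvALoop0]
  | cons v rest ih =>
    intro s1 s2
    by_cases hv : v ∈ ban0
    · simp [pvALoop0, hv, ih]
    · have h1 := pvALoop1_spec ban0 ban1 ban2 v hv s1 s1 s2
      simp [pvALoop0, hv, h1.1, ih, h1.2.1, h1.2.2]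

-- ===== VERDICT (by name: the statement is the Claim_ definition above) =====
theorem bannable_product_3_py_spec : Claim_equal_bannable_product_3_py := by
  intro bans _0s _1s _2s _hDom hPre
  unfold Pre_bannable_product_3_py at hPre
  unfold Spec_bannable_product_3_py
  match bans, hPre with
  | b0 :: b1 :: b2 :: rest, _ =>
    have h := pvALoop0_spec b0 b1 b2 _0s _1s _2s
    have c0 : (0:Int) ≤ (rest.length:Int) + 1 + 1 := by omega
    have c1 : (0:Int) ≤ (rest.length:Int) + 1 := by omega
    have c2 : (2:Int) ≤ (rest.length:Int) + 1 + 1 := by omega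
    simp only [bannable_product_3_py, bannable_product_3_py_alt, PySem.List.pyGet?,
      PySem.List.pyIdx?]
    norm_num [c0, c1, c2]
    simpa using h
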